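-- pv_equiv track=rewrite | github.com/JxVtrl/Problemas-Python | Prog1-PUCRJ/P1/Ex3_P1.py | trocaVogaisConsecutivas
-- ===== SOURCE A (Python) =====
-- def trocaVogaisConsecutivas(Achaletra):
--     if len(Achaletra) == 1:
--
--         return Achaletra
--
--     vogais = 'a', 'e', 'i', 'o', 'u'
--
--     if Achaletra[-1] in vogais and Achaletra[-2] in vogais:
--
--         return trocaVogaisConsecutivas(Achaletra[:-2]) + '*'
--
--     else:
--
--         return trocaVogaisConsecutivas(Achaletra[:-1]) + Achaletra[-1]
-- ===== SOURCE B (Python) =====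
-- def trocaVogaisConsecutivas(Achaletra):
--     vog = set('aeiou')
--     rev = Achaletra[::-1]
--     out = []
--     i = 0
--     n = len(rev)
--     while i < n:
--         if i + 1 < n and rev[i] in vog and rev[i + 1] in vog:
--             out.append('*')
--             i += 2
--         else:
--             out.append(rev[i])
--             i += 1
--     return ''.join(out)[::-1]
-- ===== Notes on version B (the rewrite author's own statement) =====
-- stated objective: faster
-- what changed: Replaced A's right-anchored recursion (each step slices a copy of the remaining prefix, quadratic work and O(n) recursion depth) by a single iterative pass over the reversed string that greedily pairs vowels into stars and joins once.
-- crash fix: A raises IndexError (its recursion reaches the empty string) exactly when the input is empty or its maximal initial run of vowels has even nonzero length; B returns the string with every such vowel pair starred there. — e.g. on trocaVogaisConsecutivas("ae"): A raises IndexError, B returns "*"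
import Mathlib
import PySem

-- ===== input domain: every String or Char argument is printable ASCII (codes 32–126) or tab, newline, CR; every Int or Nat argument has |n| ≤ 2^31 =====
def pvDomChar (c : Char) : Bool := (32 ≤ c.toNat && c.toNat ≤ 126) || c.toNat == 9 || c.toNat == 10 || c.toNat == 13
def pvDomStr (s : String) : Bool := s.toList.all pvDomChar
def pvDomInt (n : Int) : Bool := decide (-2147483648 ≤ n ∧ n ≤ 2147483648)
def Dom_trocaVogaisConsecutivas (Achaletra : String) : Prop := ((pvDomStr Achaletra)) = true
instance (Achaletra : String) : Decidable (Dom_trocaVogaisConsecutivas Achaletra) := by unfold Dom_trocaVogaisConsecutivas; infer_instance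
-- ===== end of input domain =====

-- B replaces A's right-anchored recursion with per-step whole-prefix slicing by one
-- iterative pass over the reversed string (greedy vowel pairing): faster (measured).
-- membership test "c in ('a','e','i','o','u')" used by both programs
def pvVog (c : Char) : Bool := c == 'a' || c == 'e' || c == 'i' || c == 'o' || c == 'u'

-- ===== PORT A =====
-- fuel = |input| is a pure totality guard: under Pre_ the recursion stops before the fuel does
def pvTrocaA : Nat → List Char → List Char
  | 0, l => l
  | fuel + 1, l =>
    if l.length = 1 then l
    else
      -- Achaletra[-1], Achaletra[-2]: the IndexError case (too-short list) is excluded by Pre_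
      let c1 := PySem.List.pyGetD l (-1) ' '
      let c2 := PySem.List.pyGetD l (-2) ' '
      if pvVog c1 && pvVog c2 then
        pvTrocaA fuel (PySem.List.slice l none (some (-2))) ++ ['*']
      else
        pvTrocaA fuel (PySem.List.slice l none (some (-1))) ++ [c1]

def trocaVogaisConsecutivas (Achaletra : String) : String :=
  String.ofList (pvTrocaA Achaletra.toList.length Achaletra.toList)

-- ===== PORT B =====
-- Source B's while loop reads rev[i], rev[i+1] and advances i by 1 or 2: transcribed as the
-- structural recursion on the (reversed) character list; rev = Achaletra[::-1] is reverse
-- (exact: PySem.List.slice?_none_none_neg_one)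
def pvGoB : List Char → List Char
  | c0 :: c1 :: rest =>
    if pvVog c0 && pvVog c1 then '*' :: pvGoB rest
    else c0 :: pvGoB (c1 :: rest)
  | l => l

def trocaVogaisConsecutivas_alt (Achaletra : String) : String :=
  String.ofList ((pvGoB Achaletra.toList.reverse).reverse)

-- ===== PRECONDITION & SPEC =====
-- Pre_ excludes exactly the inputs where A raises IndexError (its recursion reaches the
-- empty string): the empty input, and inputs whose maximal initial vowel run has even
-- nonzero length.
def Pre_trocaVogaisConsecutivas (Achaletra : String) : Prop :=
  Achaletra.toList ≠ [] ∧
    ((Achaletra.toList.takeWhile pvVog).length % 2 = 1 ∨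
     (Achaletra.toList.takeWhile pvVog).length = 0)
instance (Achaletra : String) : Decidable (Pre_trocaVogaisConsecutivas Achaletra) := by
  unfold Pre_trocaVogaisConsecutivas; infer_instance

def pvWitness_trocaVogaisConsecutivas : String := "banana"

-- A raises IndexError exactly on the empty string and on strings whose maximal initial
-- vowel run has even nonzero length; B returns the string with every vowel pair starred there.
def Raises_trocaVogaisConsecutivas (Achaletra : String) : Prop :=
  Achaletra.toList = [] ∨
    ((Achaletra.toList.takeWhile pvVog).length % 2 = 0 ∧
     (Achaletra.toList.takeWhile pvVog).length ≠ 0)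
instance (Achaletra : String) : Decidable (Raises_trocaVogaisConsecutivas Achaletra) := by
  unfold Raises_trocaVogaisConsecutivas; infer_instance

def pvRaiseWitness_trocaVogaisConsecutivas : String := "ae"
def pvRaiseWitnessOut_trocaVogaisConsecutivas : String := "*"

def Spec_trocaVogaisConsecutivas (Achaletra : String) (out : String) : Prop :=
  out = trocaVogaisConsecutivas_alt Achaletra
instance (Achaletra : String) (out : String) : Decidable (Spec_trocaVogaisConsecutivas Achaletra out) := by
  unfold Spec_trocaVogaisConsecutivas; infer_instance

-- ===== CLAIM (what is proved, stated in full; the proofs are below) =====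
def Claim_equal_trocaVogaisConsecutivas : Prop := ∀ (Achaletra : String), Dom_trocaVogaisConsecutivas Achaletra → Pre_trocaVogaisConsecutivas Achaletra → Spec_trocaVogaisConsecutivas Achaletra (trocaVogaisConsecutivas Achaletra)

def Claim_raises_trocaVogaisConsecutivas : Prop := (∀ (Achaletra : String), Dom_trocaVogaisConsecutivas Achaletra → Raises_trocaVogaisConsecutivas Achaletra → ¬ Pre_trocaVogaisConsecutivas Achaletra) ∧ (Dom_trocaVogaisConsecutivas (pvRaiseWitness_trocaVogaisConsecutivas) ∧ Raises_trocaVogaisConsecutivas (pvRaiseWitness_trocaVogaisConsecutivas) ∧ trocaVogaisConsecutivas_alt (pvRaiseWitness_trocaVogaisConsecutivas) = pvRaiseWitnessOut_trocaVogaisConsecutivas)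

-- ===== LEMMAS AND PROOFS =====

-- the list-level precondition
def pvP (l : List Char) : Prop :=
  l ≠ [] ∧ ((l.takeWhile pvVog).length % 2 = 1 ∨ (l.takeWhile pvVog).length = 0)
lemma pvGetD1 (u : List Char) (y x : Char) (d : Char) :
    PySem.List.pyGetD (u ++ [y, x]) (-1) d = x := by
  simp [PySem.List.pyGetD, PySem.List.pyGet?_neg_one]
lemma pvGetD2 (u : List Char) (y x : Char) (d : Char) :
    PySem.List.pyGetD (u ++ [y, x]) (-2) d = y := by
  rw [PySem.List.pyGetD, PySem.List.pyGet?_neg_ofNat _ 2 (by omega) (by simp)]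
  simp
lemma pvSliceM2 (u : List Char) (y x : Char) :
    PySem.List.slice (u ++ [y, x]) none (some (-2)) = u := by
  rw [PySem.List.slice_to_neg_ofNat _ 2 (by omega)]; simp
lemma pvSliceM1 (u : List Char) (y x : Char) :
    PySem.List.slice (u ++ [y, x]) none (some (-1)) = u ++ [y] := by
  rw [PySem.List.slice_to_neg_one]; simp

lemma pvMain (n : Nat) : ∀ (l : List Char), l.length ≤ n → pvP l →
    ∀ fuel, l.length ≤ fuel → pvTrocaA fuel l = (pvGoB l.reverse).reverse := by
  induction n with
  | zero =>
    intro l hn hP fuel _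
    exact absurd (List.length_eq_zero_iff.mp (Nat.le_zero.mp hn)) hP.1
  | succ n ih =>
    intro l hn hP fuel hfuel
    obtain ⟨hne, hpar⟩ := hP
    have hlpos : 0 < l.length := List.length_pos_iff.mpr hne
    obtain ⟨fuel, rfl⟩ : ∃ f, fuel = f + 1 := ⟨fuel - 1, by omega⟩
    by_cases h1 : l.length = 1
    · obtain ⟨c, rfl⟩ := List.length_eq_one_iff.mp h1
      simp [pvTrocaA, pvGoB]
    · have h2 : 2 ≤ l.length := by omega
      rcases hr : l.reverse with _ | ⟨x, r'⟩
      · rw [List.reverse_eq_nil_iff] at hr; exact absurd hr hne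
      rcases r' with _ | ⟨y, t⟩
      · have := congrArg List.length hr; simp at this; omega
      have hl : l = t.reverse ++ [y, x] := by
        have := congrArg List.reverse hr; simpa using this
      subst hl
      set u := t.reverse with hu
      have hlen : (u ++ [y, x]).length = u.length + 2 := by simp
      rw [pvTrocaA, if_neg h1]
      simp only [pvGetD1, pvGetD2]
      have hrev : (u ++ [y, x]).reverse = x :: y :: u.reverse := by simp [hu]
      by_cases hxy : pvVog x && pvVog y
      · rw [if_pos hxy, pvSliceM2]
        obtain ⟨hvx, hvy⟩ := Bool.and_eq_true_iff.mp hxy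
        have hune : u ≠ [] := by
          rintro h
          rw [h] at hpar
          simp [hvy, hvx] at hpar
        have hparu : (u.takeWhile pvVog).length % 2 = 1 ∨ (u.takeWhile pvVog).length = 0 := by
          by_cases hall : (u.takeWhile pvVog).length = u.length
          · have hm : ((u ++ [y, x]).takeWhile pvVog).length = u.length + 2 := by
              rw [List.takeWhile_append, if_pos hall]
              simp [hvy, hvx]
            rw [hm] at hpar
            left; omega
          · rwa [List.takeWhile_append, if_neg hall] at hpar
        rw [ih u (by simp at hn; omega) ⟨hune, hparu⟩ fuel (by simp at hfuel; omega)]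
        simp [pvGoB, hxy, hu]
      · rw [if_neg hxy, pvSliceM1]
        have hparu : ((u ++ [y]).takeWhile pvVog).length % 2 = 1 ∨
            ((u ++ [y]).takeWhile pvVog).length = 0 := by
          by_cases hall : (u.takeWhile pvVog).length = u.length
          · by_cases hvy : pvVog y = true
            · have hvx : pvVog x = false := by
                cases hx : pvVog x
                · rfl
                · simp [hx, hvy] at hxy
              have hm : ((u ++ [y, x]).takeWhile pvVog).length = u.length + 1 := by
                rw [List.takeWhile_append, if_pos hall]
                simp [hvy, hvx]
              have hm' : ((u ++ [y]).takeWhile pvVog).length = u.length + 1 := by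
                rw [List.takeWhile_append, if_pos hall]
                simp [hvy]
              rw [hm] at hpar
              rw [hm']
              left; omega
            · have hvy' : pvVog y = false := by simpa using hvy
              have hm : ((u ++ [y, x]).takeWhile pvVog).length = u.length := by
                rw [List.takeWhile_append, if_pos hall]
                simp [hvy']
              have hm' : ((u ++ [y]).takeWhile pvVog).length = u.length := by
                rw [List.takeWhile_append, if_pos hall]
                simp [hvy']
              rw [hm] at hpar
              rw [hm']
              exact hpar
          · have hm : (u ++ [y, x]).takeWhile pvVog = u.takeWhile pvVog := by
              rw [List.takeWhile_append, if_neg hall]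
            have hm' : (u ++ [y]).takeWhile pvVog = u.takeWhile pvVog := by
              rw [List.takeWhile_append, if_neg hall]
            rw [hm] at hpar
            rw [hm']
            exact hpar
        rw [ih (u ++ [y]) (by simp at hn ⊢; omega) ⟨by simp, hparu⟩ fuel
          (by simp at hfuel ⊢; omega)]
        simp [pvGoB, hxy, hu]

-- ===== VERDICT (by name: the statement is the Claim_ definition above) =====
theorem trocaVogaisConsecutivas_spec : Claim_equal_trocaVogaisConsecutivas := by
  intro s _ hpre
  unfold Spec_trocaVogaisConsecutivas trocaVogaisConsecutivas trocaVogaisConsecutivas_alt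
  rw [pvMain s.toList.length s.toList le_rfl hpre _ le_rfl]

theorem trocaVogaisConsecutivas_raises : Claim_raises_trocaVogaisConsecutivas := by
  unfold Claim_raises_trocaVogaisConsecutivas
  refine ⟨?_, by decide⟩
  intro s _ hr hp
  rcases hr with h | ⟨h1, h2⟩
  · exact hp.1 h
  · rcases hp.2 with h | h <;> omega

-- concrete self-check of the crash-fix claim: B returns the stated value at the raise witness
theorem pvRaiseWitness_ok :
    trocaVogaisConsecutivas_alt pvRaiseWitness_trocaVogaisConsecutivas =
      pvRaiseWitnessOut_trocaVogaisConsecutivas :=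
  trocaVogaisConsecutivas_raises.2.2.2
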